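-- pv_equiv track=rewrite | github.com/jdufou1/M1ANDROIDE_COMPLEX | projet/graph.py | isCouplage
-- ===== SOURCE A (Python) =====
-- def isCouplage(couplage , graph):
--     _,E=graph
--     toCheck = set() # ensemble qui va contenir toutes les arêtes engendrées par notre couplage dans le graphe
--     for v_couplage in couplage:
--         for edge in E:
--             if v_couplage in edge: # Si un sommet de notre couplage \in edge alors peut ajouter l'arrete engendré par ce sommet dans l'ensemble a verifier
--                 if not edge in toCheck: # On ajoute pas deux fois la meme arrete dans l'ensemble
--                     toCheck.add(edge)
--     return toCheck == E
-- ===== SOURCE B (Python) =====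
-- def isCouplage(couplage, graph):
--     _, E = graph
--     cs = set(couplage)
--     return all(a in cs or b in cs for (a, b) in E)
-- ===== Notes on version B (the rewrite author's own statement) =====
-- stated objective: faster
-- what changed: B drops A's nested loops that build the set of covered edges and compare it with E by set equality, and instead checks each edge directly with one all() over E against a hash set of couplage.
import Mathlib
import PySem

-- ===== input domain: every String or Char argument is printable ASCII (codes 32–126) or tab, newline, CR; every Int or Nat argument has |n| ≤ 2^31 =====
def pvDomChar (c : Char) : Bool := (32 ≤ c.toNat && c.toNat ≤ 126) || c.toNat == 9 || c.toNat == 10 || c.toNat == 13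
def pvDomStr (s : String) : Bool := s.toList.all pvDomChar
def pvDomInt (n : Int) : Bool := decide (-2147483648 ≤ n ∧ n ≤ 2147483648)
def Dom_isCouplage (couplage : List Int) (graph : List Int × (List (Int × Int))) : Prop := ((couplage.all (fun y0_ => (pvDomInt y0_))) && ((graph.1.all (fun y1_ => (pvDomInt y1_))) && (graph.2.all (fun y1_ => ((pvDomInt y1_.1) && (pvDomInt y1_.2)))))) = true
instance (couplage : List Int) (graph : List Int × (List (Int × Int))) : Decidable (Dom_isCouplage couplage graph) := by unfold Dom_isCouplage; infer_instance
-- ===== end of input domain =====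

-- B replaces A's nested loops (build the set of edges covered by couplage, then compare it with E
-- by set equality) with a direct `all` over the edges: every edge must have an endpoint in couplage.

-- ===== PORT A =====
def isCouplage (couplage : List Int) (graph : List Int × (List (Int × Int))) : Bool :=
  let E := graph.2
  -- toCheck: set of edges of E touched by a vertex of couplage, built exactly as A builds it
  let toCheck : PySem.Set (Int × Int) :=
    couplage.foldl (fun acc v_couplage =>
      E.foldl (fun acc edge =>
        if v_couplage = edge.1 ∨ v_couplage = edge.2 then  -- v_couplage in edge
          if ¬ (acc.contains edge) then acc.add edge else acc
        else acc) acc) PySem.Set.empty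
  PySem.Set.equal toCheck E  -- Python's set equality toCheck == E

-- ===== PORT B =====
def isCouplage_alt (couplage : List Int) (graph : List Int × (List (Int × Int))) : Bool :=
  let cs : PySem.Set Int := PySem.Set.ofList couplage
  graph.2.all (fun e => cs.contains e.1 || cs.contains e.2)

-- ===== PRECONDITION & SPEC =====
def Spec_isCouplage (couplage : List Int) (graph : List Int × (List (Int × Int))) (out : Bool) : Prop := out = isCouplage_alt couplage graph
instance (couplage : List Int) (graph : List Int × (List (Int × Int))) (out : Bool) : Decidable (Spec_isCouplage couplage graph out) := by unfold Spec_isCouplage; infer_instance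

-- ===== CLAIM (what is proved, stated in full; the proofs are below) =====
def Claim_equal_isCouplage : Prop := ∀ (couplage : List Int) (graph : List Int × (List (Int × Int))), Dom_isCouplage couplage graph → Spec_isCouplage couplage graph (isCouplage couplage graph)

-- ===== LEMMAS AND PROOFS =====

-- membership after A's inner loop over the edges (for one couplage vertex v)
theorem mem_inner (v : Int) (E : List (Int × Int)) (acc : PySem.Set (Int × Int))
    (x : Int × Int) :
    x ∈ E.foldl (fun acc edge =>
        if v = edge.1 ∨ v = edge.2 then
          if ¬ (acc.contains edge) then acc.add edge else acc
        else acc) acc ↔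
      x ∈ acc ∨ (x ∈ E ∧ (v = x.1 ∨ v = x.2)) := by
  induction E generalizing acc with
  | nil => simp
  | cons e E ih =>
    simp only [List.foldl_cons, ih, List.mem_cons]
    by_cases hv : v = e.1 ∨ v = e.2 <;>
      by_cases hc : PySem.Set.contains acc e = true <;>
      simp_all [PySem.Set.contains] <;>
      constructor <;> rintro (h | h | h) <;> aesop

-- membership in toCheck after the whole double loop
theorem mem_toCheck (couplage : List Int) (E : List (Int × Int))
    (acc : PySem.Set (Int × Int)) (x : Int × Int) :
    x ∈ couplage.foldl (fun acc v =>
        E.foldl (fun acc edge =>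
          if v = edge.1 ∨ v = edge.2 then
            if ¬ (acc.contains edge) then acc.add edge else acc
          else acc) acc) acc ↔
      x ∈ acc ∨ (x ∈ E ∧ ∃ v ∈ couplage, v = x.1 ∨ v = x.2) := by
  induction couplage generalizing acc with
  | nil => simp
  | cons v vs ih =>
    simp only [List.foldl_cons, ih, mem_inner, List.mem_cons]
    aesop

-- ===== VERDICT (by name: the statement is the Claim_ definition above) =====
theorem isCouplage_spec : Claim_equal_isCouplage := by
  intro couplage graph _
  unfold Spec_isCouplage isCouplage isCouplage_alt
  simp only []
  rcases graph with ⟨V, E⟩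
  rw [Bool.eq_iff_iff, PySem.Set.equal_iff, List.all_eq_true]
  constructor
  · intro h e he
    have := (h e).mpr he
    rw [mem_toCheck] at this
    rcases this with h' | ⟨_, v, hv, hve⟩
    · simp [PySem.Set.empty] at h'
    · simp only [Bool.or_eq_true, PySem.Set.contains, List.contains_eq_mem,
        decide_eq_true_eq]
      rcases hve with h' | h' <;> [left; right] <;>
        exact (PySem.Set.mem_ofList _ _).mpr (h' ▸ hv)
  · intro h x
    rw [mem_toCheck]
    constructor
    · rintro (h' | ⟨hx, _⟩)
      · simp [PySem.Set.empty] at h'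
      · exact hx
    · intro hx
      have := h x hx
      simp only [Bool.or_eq_true, PySem.Set.contains, List.contains_eq_mem,
        decide_eq_true_eq, PySem.Set.mem_ofList] at this
      right
      exact ⟨hx, by rcases this with h' | h' <;> exact ⟨_, h', by simp⟩⟩
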